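-- pv_equiv track=rewrite | github.com/PlayfulProcess/recursive.eco-schemas | scripts/build_frederick_douglass.py | find_chapter_boundaries
-- ===== SOURCE A (Python) =====
-- CHAPTERS = [
--     {"num": "I", "slug": "ch01", "title": "Chapter I: Birth, Family, and the Blood-Stained Gate",
--      "summary": "Douglass recounts his birth in Tuckahoe, Maryland, his uncertain age, separation from his mother, the whispered identity of his white father, and the horrifying first witness of Aunt Hester's whipping — 'the blood-stained gate, the entrance to the hell of slavery.'"},
--     {"num": "II", "slug": "ch02", "title": "Chapter II: The Great House Farm",
--      "summary": "Life on Colonel Lloyd's plantation — the Great House Farm as the center of the slaveholding world, the slave songs that carried hidden sorrow, the hierarchy among slaves, and the elaborate provisions for the master's table."},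
--     {"num": "III", "slug": "ch03", "title": "Chapter III: Colonel Lloyd's Domain",
--      "summary": "The vast wealth and power of Colonel Lloyd — his garden, stables, and the constant dread among slaves. Douglass reveals how slaves were punished for telling the truth about their conditions, teaching them that honesty was dangerous."},
--     {"num": "IV", "slug": "ch04", "title": "Chapter IV: The Murder of Demby",
--      "summary": "The reign of overseer Austin Gore, a man 'equal to deceiving the most practiced,' and his cold-blooded murder of a slave named Demby who refused to come out of a creek during a whipping. The killing went unpunished — 'killing a slave, or any colored person, was not treated as a crime.'"},
--     {"num": "V", "slug": "ch05", "title": "Chapter V: Leaving the Plantation",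
--      "summary": "Douglass's childhood on the plantation — hunger, cold, the coarse linen shirt his only garment. Then the miraculous news: he is to be sent to Baltimore. He scrubs himself clean with hope, sensing this departure will shape his destiny."},
--     {"num": "VI", "slug": "ch06", "title": "Chapter VI: Mrs. Auld and the Alphabet",
--      "summary": "In Baltimore, Sophia Auld begins teaching Douglass his letters — until her husband forbids it, declaring that learning would make a slave 'unfit' and 'discontented.' This prohibition becomes Douglass's revelation: 'I now understood what had been to me a most perplexing difficulty — the white man's power to enslave the black man.'"},
--     {"num": "VII", "slug": "ch07", "title": "Chapter VII: Learning to Read and Write",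
--      "summary": "Douglass's determined self-education — trading bread for reading lessons from white boys, discovering The Columbian Orator, learning the word 'abolition.' Reading awakens consciousness but also torment: 'I would at times feel that learning to read had been a curse rather than a blessing.'"},
--     {"num": "VIII", "slug": "ch08", "title": "Chapter VIII: The Valuation",
--      "summary": "After old Master Anthony's death, Douglass is sent back to be valued alongside livestock. 'Men and women, old and young, married and single, were ranked with horses, sheep, and swine.' He narrowly avoids being sent to the cruel Andrew and returns to Baltimore."},
--     {"num": "IX", "slug": "ch09", "title": "Chapter IX: Master Thomas and Religious Hypocrisy",
--      "summary": "Life with Thomas Auld at St. Michael's — a master who uses religion to justify cruelty. Auld's conversion makes him worse, not better. Douglass exposes the savage irony of Christian slaveholders who quote scripture while starving and whipping their slaves."},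
--     {"num": "X", "slug": "ch10", "title": "Chapter X: Covey, the Turning Point, and the Fight for Freedom",
--      "summary": "The longest and most dramatic chapter. Douglass is 'broken' by the slave-breaker Edward Covey, then rises up to fight him in a pivotal two-hour battle. 'This battle was the turning-point in my career as a slave. It rekindled the few expiring embers of freedom.' Later, a failed escape attempt, then time with the kind Mr. Freeland before being sent back to Baltimore."},
--     {"num": "XI", "slug": "ch11", "title": "Chapter XI: Escape and Freedom",
--      "summary": "Douglass's final chapter — hired out as a caulker in Baltimore, he plans and executes his escape to New York. He deliberately withholds details to protect those who helped and those still enslaved. Marriage to Anna Murray, arrival in New Bedford, discovery of The Liberator, and the beginning of his life as an abolitionist."},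
-- ]
--
-- APPENDIX_SLUG = "appendix"
--
-- PARODY_SLUG = "parody"
--
-- def find_chapter_boundaries(text):
--     """Find the start line of each chapter, plus appendix and parody."""
--     lines = text.split('\n')
--     boundaries = []
--
--     for ch in CHAPTERS:
--         pattern = f"CHAPTER {ch['num']}"
--         for i, line in enumerate(lines):
--             stripped = line.strip()
--             if stripped == pattern:
--                 boundaries.append((i, ch["slug"], ch))
--                 break
--
--     # Find APPENDIX
--     for i, line in enumerate(lines):
--         stripped = line.strip()
--         if stripped == "APPENDIX":
--             boundaries.append((i, APPENDIX_SLUG, None))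
--             break
--
--     # Find A PARODY
--     for i, line in enumerate(lines):
--         stripped = line.strip()
--         if stripped == "A PARODY":
--             boundaries.append((i, PARODY_SLUG, None))
--             break
--
--     boundaries.sort(key=lambda x: x[0])
--     return boundaries, lines
-- ===== SOURCE B (Python) =====
-- # Single forward pass: a dict maps each stripped heading to its payload and is
-- # popped on first hit, so the output is already in line order (no sort needed).
-- CHAPTERS = [
--     {"num": "I", "slug": "ch01", "title": "Chapter I: Birth, Family, and the Blood-Stained Gate",
--      "summary": "Douglass recounts his birth in Tuckahoe, Maryland, his uncertain age, separation from his mother, the whispered identity of his white father, and the horrifying first witness of Aunt Hester's whipping — 'the blood-stained gate, the entrance to the hell of slavery.'"},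
--     {"num": "II", "slug": "ch02", "title": "Chapter II: The Great House Farm",
--      "summary": "Life on Colonel Lloyd's plantation — the Great House Farm as the center of the slaveholding world, the slave songs that carried hidden sorrow, the hierarchy among slaves, and the elaborate provisions for the master's table."},
--     {"num": "III", "slug": "ch03", "title": "Chapter III: Colonel Lloyd's Domain",
--      "summary": "The vast wealth and power of Colonel Lloyd — his garden, stables, and the constant dread among slaves. Douglass reveals how slaves were punished for telling the truth about their conditions, teaching them that honesty was dangerous."},
--     {"num": "IV", "slug": "ch04", "title": "Chapter IV: The Murder of Demby",
--      "summary": "The reign of overseer Austin Gore, a man 'equal to deceiving the most practiced,' and his cold-blooded murder of a slave named Demby who refused to come out of a creek during a whipping. The killing went unpunished — 'killing a slave, or any colored person, was not treated as a crime.'"},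
--     {"num": "V", "slug": "ch05", "title": "Chapter V: Leaving the Plantation",
--      "summary": "Douglass's childhood on the plantation — hunger, cold, the coarse linen shirt his only garment. Then the miraculous news: he is to be sent to Baltimore. He scrubs himself clean with hope, sensing this departure will shape his destiny."},
--     {"num": "VI", "slug": "ch06", "title": "Chapter VI: Mrs. Auld and the Alphabet",
--      "summary": "In Baltimore, Sophia Auld begins teaching Douglass his letters — until her husband forbids it, declaring that learning would make a slave 'unfit' and 'discontented.' This prohibition becomes Douglass's revelation: 'I now understood what had been to me a most perplexing difficulty — the white man's power to enslave the black man.'"},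
--     {"num": "VII", "slug": "ch07", "title": "Chapter VII: Learning to Read and Write",
--      "summary": "Douglass's determined self-education — trading bread for reading lessons from white boys, discovering The Columbian Orator, learning the word 'abolition.' Reading awakens consciousness but also torment: 'I would at times feel that learning to read had been a curse rather than a blessing.'"},
--     {"num": "VIII", "slug": "ch08", "title": "Chapter VIII: The Valuation",
--      "summary": "After old Master Anthony's death, Douglass is sent back to be valued alongside livestock. 'Men and women, old and young, married and single, were ranked with horses, sheep, and swine.' He narrowly avoids being sent to the cruel Andrew and returns to Baltimore."},
--     {"num": "IX", "slug": "ch09", "title": "Chapter IX: Master Thomas and Religious Hypocrisy",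
--      "summary": "Life with Thomas Auld at St. Michael's — a master who uses religion to justify cruelty. Auld's conversion makes him worse, not better. Douglass exposes the savage irony of Christian slaveholders who quote scripture while starving and whipping their slaves."},
--     {"num": "X", "slug": "ch10", "title": "Chapter X: Covey, the Turning Point, and the Fight for Freedom",
--      "summary": "The longest and most dramatic chapter. Douglass is 'broken' by the slave-breaker Edward Covey, then rises up to fight him in a pivotal two-hour battle. 'This battle was the turning-point in my career as a slave. It rekindled the few expiring embers of freedom.' Later, a failed escape attempt, then time with the kind Mr. Freeland before being sent back to Baltimore."},
--     {"num": "XI", "slug": "ch11", "title": "Chapter XI: Escape and Freedom",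
--      "summary": "Douglass's final chapter — hired out as a caulker in Baltimore, he plans and executes his escape to New York. He deliberately withholds details to protect those who helped and those still enslaved. Marriage to Anna Murray, arrival in New Bedford, discovery of The Liberator, and the beginning of his life as an abolitionist."},
-- ]
--
-- APPENDIX_SLUG = "appendix"
--
-- PARODY_SLUG = "parody"
--
-- def find_chapter_boundaries(text):
--     """Find the start line of each chapter, plus appendix and parody."""
--     lines = text.split('\n')
--     remaining = {f"CHAPTER {ch['num']}": (ch["slug"], ch) for ch in CHAPTERS}
--     remaining["APPENDIX"] = (APPENDIX_SLUG, None)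
--     remaining["A PARODY"] = (PARODY_SLUG, None)
--     boundaries = []
--     for i, line in enumerate(lines):
--         hit = remaining.pop(line.strip(), None)
--         if hit is not None:
--             boundaries.append((i, hit[0], hit[1]))
--     return boundaries, lines
-- ===== Notes on version B (the rewrite author's own statement) =====
-- stated objective: alternative
-- what changed: A scans the line list once per target (13 scan-and-break passes) and then sorts the hits; B builds a heading-to-payload dict once and makes a single enumerate pass over the lines, popping each heading on its first hit, so the result comes out already in line order with no sort.
import Mathlib
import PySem

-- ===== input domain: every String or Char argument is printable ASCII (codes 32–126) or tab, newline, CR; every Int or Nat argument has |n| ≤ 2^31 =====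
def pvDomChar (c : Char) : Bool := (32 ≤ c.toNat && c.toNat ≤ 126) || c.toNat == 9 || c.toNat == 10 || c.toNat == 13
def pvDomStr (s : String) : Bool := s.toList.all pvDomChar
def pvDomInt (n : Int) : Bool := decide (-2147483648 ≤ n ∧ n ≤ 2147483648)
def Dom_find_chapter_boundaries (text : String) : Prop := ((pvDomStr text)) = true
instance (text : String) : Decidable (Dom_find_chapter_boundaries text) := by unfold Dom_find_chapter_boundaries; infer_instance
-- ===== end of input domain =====

-- B replaces A's thirteen scan-and-break passes plus a sort by ONE forward pass over the
-- lines with a pop-on-first-hit table of headings, emitting boundaries already in line order.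

-- ===== PORT A =====
def CHAPTERS : List (List (String × String)) :=
[
  [("num", "I"), ("slug", "ch01"), ("title", "Chapter I: Birth, Family, and the Blood-Stained Gate"), ("summary", "Douglass recounts his birth in Tuckahoe, Maryland, his uncertain age, separation from his mother, the whispered identity of his white father, and the horrifying first witness of Aunt Hester's whipping — 'the blood-stained gate, the entrance to the hell of slavery.'")],
  [("num", "II"), ("slug", "ch02"), ("title", "Chapter II: The Great House Farm"), ("summary", "Life on Colonel Lloyd's plantation — the Great House Farm as the center of the slaveholding world, the slave songs that carried hidden sorrow, the hierarchy among slaves, and the elaborate provisions for the master's table.")],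
  [("num", "III"), ("slug", "ch03"), ("title", "Chapter III: Colonel Lloyd's Domain"), ("summary", "The vast wealth and power of Colonel Lloyd — his garden, stables, and the constant dread among slaves. Douglass reveals how slaves were punished for telling the truth about their conditions, teaching them that honesty was dangerous.")],
  [("num", "IV"), ("slug", "ch04"), ("title", "Chapter IV: The Murder of Demby"), ("summary", "The reign of overseer Austin Gore, a man 'equal to deceiving the most practiced,' and his cold-blooded murder of a slave named Demby who refused to come out of a creek during a whipping. The killing went unpunished — 'killing a slave, or any colored person, was not treated as a crime.'")],
  [("num", "V"), ("slug", "ch05"), ("title", "Chapter V: Leaving the Plantation"), ("summary", "Douglass's childhood on the plantation — hunger, cold, the coarse linen shirt his only garment. Then the miraculous news: he is to be sent to Baltimore. He scrubs himself clean with hope, sensing this departure will shape his destiny.")],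
  [("num", "VI"), ("slug", "ch06"), ("title", "Chapter VI: Mrs. Auld and the Alphabet"), ("summary", "In Baltimore, Sophia Auld begins teaching Douglass his letters — until her husband forbids it, declaring that learning would make a slave 'unfit' and 'discontented.' This prohibition becomes Douglass's revelation: 'I now understood what had been to me a most perplexing difficulty — the white man's power to enslave the black man.'")],
  [("num", "VII"), ("slug", "ch07"), ("title", "Chapter VII: Learning to Read and Write"), ("summary", "Douglass's determined self-education — trading bread for reading lessons from white boys, discovering The Columbian Orator, learning the word 'abolition.' Reading awakens consciousness but also torment: 'I would at times feel that learning to read had been a curse rather than a blessing.'")],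
  [("num", "VIII"), ("slug", "ch08"), ("title", "Chapter VIII: The Valuation"), ("summary", "After old Master Anthony's death, Douglass is sent back to be valued alongside livestock. 'Men and women, old and young, married and single, were ranked with horses, sheep, and swine.' He narrowly avoids being sent to the cruel Andrew and returns to Baltimore.")],
  [("num", "IX"), ("slug", "ch09"), ("title", "Chapter IX: Master Thomas and Religious Hypocrisy"), ("summary", "Life with Thomas Auld at St. Michael's — a master who uses religion to justify cruelty. Auld's conversion makes him worse, not better. Douglass exposes the savage irony of Christian slaveholders who quote scripture while starving and whipping their slaves.")],
  [("num", "X"), ("slug", "ch10"), ("title", "Chapter X: Covey, the Turning Point, and the Fight for Freedom"), ("summary", "The longest and most dramatic chapter. Douglass is 'broken' by the slave-breaker Edward Covey, then rises up to fight him in a pivotal two-hour battle. 'This battle was the turning-point in my career as a slave. It rekindled the few expiring embers of freedom.' Later, a failed escape attempt, then time with the kind Mr. Freeland before being sent back to Baltimore.")],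
  [("num", "XI"), ("slug", "ch11"), ("title", "Chapter XI: Escape and Freedom"), ("summary", "Douglass's final chapter — hired out as a caulker in Baltimore, he plans and executes his escape to New York. He deliberately withholds details to protect those who helped and those still enslaved. Marriage to Anna Murray, arrival in New Bedford, discovery of The Liberator, and the beginning of his life as an abolitionist.")]
]

-- ch["num"] / ch["slug"]: Python dict lookup (first match; the keys are always present in CHAPTERS)
def pvDget (ch : List (String × String)) (k : String) : String :=
  match ch with
  | [] => ""
  | (k', v) :: rest => if k' = k then v else pvDget rest k

-- the inner `for i, line in enumerate(lines): if line.strip() == pattern: … break` loop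
def pvFindFirst (pat : String) (k : Int) : List String → Option Int
  | [] => none
  | l :: ls => if PySem.Str.strip l = pat then some k else pvFindFirst pat (k + 1) ls

def find_chapter_boundaries (text : String) : (List (Int × String × (Option (List (String × String))))) × List String :=
  let lines := (PySem.Str.split? text "\n").getD []  -- sep "\n" ≠ "": split? is always some here
  let boundaries : List (Int × String × Option (List (String × String))) :=
    CHAPTERS.foldl (fun acc ch =>
      match pvFindFirst ("CHAPTER " ++ pvDget ch "num") 0 lines with
      | some i => acc ++ [(i, pvDget ch "slug", some ch)]
      | none => acc) []
  let boundaries :=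
    match pvFindFirst "APPENDIX" 0 lines with
    | some i => boundaries ++ [(i, "appendix", none)]
    | none => boundaries
  let boundaries :=
    match pvFindFirst "A PARODY" 0 lines with
    | some i => boundaries ++ [(i, "parody", none)]
    | none => boundaries
  (PySem.List.sorted boundaries (fun x => x.1) false, lines)

-- ===== PORT B =====
-- the dict `remaining` of Source B: heading ↦ (slug, payload), built once
def pvTargets : List (String × String × Option (List (String × String))) :=
  CHAPTERS.map (fun ch => ("CHAPTER " ++ pvDget ch "num", pvDget ch "slug", some ch))
    ++ [("APPENDIX", "appendix", none), ("A PARODY", "parody", none)]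

-- remaining.pop(key, None): first-match lookup …
def pvLookup (ts : List (String × String × Option (List (String × String)))) (s : String) :
    Option (String × Option (List (String × String))) :=
  match ts with
  | [] => none
  | t :: rest => if t.1 = s then some t.2 else pvLookup rest s

-- … and removal of that key (keys of pvTargets are distinct, so this is dict.pop)
def pvRemove (ts : List (String × String × Option (List (String × String)))) (s : String) :
    List (String × String × Option (List (String × String))) :=
  ts.filter (fun t => t.1 ≠ s)

-- the single `for i, line in enumerate(lines)` loop of Source B
def pvScan (ts : List (String × String × Option (List (String × String)))) (k : Int) :
    List String → List (Int × String × Option (List (String × String)))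
  | [] => []
  | l :: ls =>
    match pvLookup ts (PySem.Str.strip l) with
    | some hit => (k, hit.1, hit.2) :: pvScan (pvRemove ts (PySem.Str.strip l)) (k + 1) ls
    | none => pvScan ts (k + 1) ls

def find_chapter_boundaries_alt (text : String) : (List (Int × String × (Option (List (String × String))))) × List String :=
  let lines := (PySem.Str.split? text "\n").getD []  -- sep "\n" ≠ "": split? is always some here
  (pvScan pvTargets 0 lines, lines)

-- ===== PRECONDITION & SPEC =====
def Spec_find_chapter_boundaries (text : String) (out : (List (Int × String × (Option (List (String × String))))) × List String) : Prop := out = find_chapter_boundaries_alt text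
instance (text : String) (out : (List (Int × String × (Option (List (String × String))))) × List String) : Decidable (Spec_find_chapter_boundaries text out) := by
  unfold Spec_find_chapter_boundaries
  letI h1 : DecidableEq (Int × String × Option (List (String × String))) := inferInstance
  letI h2 : DecidableEq (List (Int × String × Option (List (String × String)))) := @instDecidableEqList _ h1
  exact @instDecidableEqProd _ _ h2 inferInstance out _

-- ===== CLAIM (what is proved, stated in full; the proofs are below) =====
def Claim_equal_find_chapter_boundaries : Prop := ∀ (text : String), Dom_find_chapter_boundaries text → Spec_find_chapter_boundaries text (find_chapter_boundaries text)

-- ===== LEMMAS AND PROOFS =====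

-- A's list of hits for a target list, as one filterMap
def pvHits (ts : List (String × String × Option (List (String × String)))) (k : Int)
    (lines : List String) : List (Int × String × Option (List (String × String))) :=
  ts.filterMap (fun t => (pvFindFirst t.1 k lines).map (fun i => (i, t.2)))

theorem pvHits_nil (ts : List (String × String × Option (List (String × String)))) (k : Int) :
    pvHits ts k [] = [] := by
  induction ts with
  | nil => rfl
  | cons t rest ih => simpa [pvHits, pvFindFirst] using ih

theorem pvFindFirst_cons_of_ne (pat : String) (k : Int) (l : String) (ls : List String)
    (h : PySem.Str.strip l ≠ pat) : pvFindFirst pat k (l :: ls) = pvFindFirst pat (k + 1) ls := by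
  simp [pvFindFirst, h]

theorem pvHits_cons_of_no_match (ts : List (String × String × Option (List (String × String))))
    (k : Int) (l : String) (ls : List String) (h : ∀ t ∈ ts, t.1 ≠ PySem.Str.strip l) :
    pvHits ts k (l :: ls) = pvHits ts (k + 1) ls := by
  induction ts with
  | nil => rfl
  | cons t rest ih =>
    have h1 : t.1 ≠ PySem.Str.strip l := h t (by simp)
    have h2 : PySem.Str.strip l ≠ t.1 := fun e => h1 e.symm
    simp only [pvHits, List.filterMap_cons] at ih ⊢
    rw [pvFindFirst_cons_of_ne _ _ _ _ h2, ih (fun t' ht' => h t' (by simp [ht']))]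

theorem pvLookup_none_iff (ts : List (String × String × Option (List (String × String)))) (s : String) :
    pvLookup ts s = none ↔ ∀ t ∈ ts, t.1 ≠ s := by
  induction ts with
  | nil => simp [pvLookup]
  | cons t rest ih =>
    by_cases h : t.1 = s
    · simp [pvLookup, h]
    · simp [pvLookup, h, ih]

-- pvLookup finds the entry: ts decomposes as pre ++ (s, hit) :: post with no key s in pre
theorem pvLookup_some_split (ts : List (String × String × Option (List (String × String))))
    (s : String) (hit : String × Option (List (String × String)))
    (h : pvLookup ts s = some hit) :
    ∃ pre post, ts = pre ++ (s, hit) :: post ∧ ∀ t ∈ pre, t.1 ≠ s := by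
  induction ts with
  | nil => simp [pvLookup] at h
  | cons t rest ih =>
    by_cases ht : t.1 = s
    · simp [pvLookup, ht] at h
      exact ⟨[], rest, by simp [← ht, ← h], by simp⟩
    · simp [pvLookup, ht] at h
      obtain ⟨pre, post, heq, hpre⟩ := ih h
      exact ⟨t :: pre, post, by simp [heq], by
        intro t' ht'
        rcases List.mem_cons.mp ht' with rfl | hm
        · exact ht
        · exact hpre t' hm⟩

-- every index produced by the scan is ≥ the running counter
theorem pvScan_index_ge (lines : List String) :
    ∀ (ts : List (String × String × Option (List (String × String)))) (k : Int)
      (x : Int × String × Option (List (String × String))), x ∈ pvScan ts k lines → k ≤ x.1 := by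
  induction lines with
  | nil => intro ts k x hx; simp [pvScan] at hx
  | cons l ls ih =>
    intro ts k x hx
    simp only [pvScan] at hx
    cases hL : pvLookup ts (PySem.Str.strip l) with
    | none =>
      rw [hL] at hx
      have := ih ts (k + 1) x hx; omega
    | some hit =>
      rw [hL] at hx
      rcases List.mem_cons.mp hx with rfl | hm
      · simp
      · have := ih _ (k + 1) x hm; omega

-- core invariant: the scan is a permutation of A's hit list and strictly increasing in index
theorem pvScan_perm_pairwise (lines : List String) :
    ∀ (ts : List (String × String × Option (List (String × String)))) (k : Int),
      (ts.map (fun t => t.1)).Nodup →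
      (pvScan ts k lines).Perm (pvHits ts k lines) ∧
      (pvScan ts k lines).Pairwise (fun a b => a.1 < b.1) := by
  induction lines with
  | nil => intro ts k _; simp [pvScan, pvHits_nil]
  | cons l ls ih =>
    intro ts k hnd
    simp only [pvScan]
    cases hL : pvLookup ts (PySem.Str.strip l) with
    | none =>
      have hno : ∀ t ∈ ts, t.1 ≠ PySem.Str.strip l := (pvLookup_none_iff ts _).mp hL
      rw [pvHits_cons_of_no_match ts k l ls hno]
      exact ih ts (k + 1) hnd
    | some hit =>
      obtain ⟨pre, post, heq, hpre⟩ := pvLookup_some_split ts _ hit hL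
      -- keys of pre/post differ from strip l, by Nodup
      have hndk : ((pre ++ (PySem.Str.strip l, hit) :: post).map (fun t => t.1)).Nodup := heq ▸ hnd
      have hpost : ∀ t ∈ post, t.1 ≠ PySem.Str.strip l := by
        intro t htm he
        simp only [List.map_append, List.map_cons, List.nodup_append] at hndk
        have := hndk.2.1
        rw [List.nodup_cons] at this
        exact this.1 (he ▸ List.mem_map_of_mem htm)
      have hrem : pvRemove ts (PySem.Str.strip l) = pre ++ post := by
        rw [heq]
        simp only [pvRemove, List.filter_append, List.filter_cons]
        have : (PySem.Str.strip l ≠ PySem.Str.strip l) = False := by simp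
        simp only [ne_eq, decide_not]
        rw [List.filter_eq_self.mpr (by intro t ht; simpa using hpre t ht),
            List.filter_eq_self.mpr (by intro t ht; simpa using hpost t ht)]
        simp
      have hndrem : ((pre ++ post).map (fun t => t.1)).Nodup := by
        simp only [List.map_append, List.map_cons, List.nodup_append] at hndk ⊢
        refine ⟨hndk.1, (List.nodup_cons.mp hndk.2.1).2, ?_⟩
        intro a ha b hb
        exact hndk.2.2 a ha b (by simp [hb])
      obtain ⟨ihp, ihpw⟩ := ih (pre ++ post) (k + 1) hndrem
      rw [hrem]
      constructor
      · -- permutation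
        have hhits : pvHits ts k (l :: ls) =
            pvHits pre k (l :: ls) ++ ((k, hit) :: pvHits post k (l :: ls)) := by
          rw [heq]
          simp only [pvHits, List.filterMap_append, List.filterMap_cons]
          have : pvFindFirst (PySem.Str.strip l) k (l :: ls) = some k := by
            simp [pvFindFirst]
          rw [this]
          rfl
        rw [hhits,
            pvHits_cons_of_no_match pre k l ls (by intro t ht; exact hpre t ht),
            pvHits_cons_of_no_match post k l ls (by intro t ht; exact hpost t ht)]
        have hsplit : pvHits (pre ++ post) (k + 1) ls
            = pvHits pre (k + 1) ls ++ pvHits post (k + 1) ls := by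
          simp [pvHits, List.filterMap_append]
        exact (ihp.cons (k, hit)).trans (hsplit ▸ List.perm_middle.symm)
      · -- pairwise
        refine List.Pairwise.cons ?_ ihpw
        intro b hb
        have := pvScan_index_ge ls (pre ++ post) (k + 1) b hb
        simp only
        omega

-- A's chapter hits, as one filterMap
def pvChapHits (lines : List String) : List (Int × String × Option (List (String × String))) :=
  CHAPTERS.filterMap (fun ch => (pvFindFirst ("CHAPTER " ++ pvDget ch "num") 0 lines).map
    (fun i => (i, pvDget ch "slug", some ch)))

-- A's fold over CHAPTERS with append = filterMap
theorem pvFoldl_chapters (lines : List String) (cs : List (List (String × String)))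
    (acc : List (Int × String × Option (List (String × String)))) :
    cs.foldl (fun acc ch =>
        match pvFindFirst ("CHAPTER " ++ pvDget ch "num") 0 lines with
        | some i => acc ++ [(i, pvDget ch "slug", some ch)]
        | none => acc) acc
      = acc ++ cs.filterMap (fun ch => (pvFindFirst ("CHAPTER " ++ pvDget ch "num") 0 lines).map
          (fun i => (i, pvDget ch "slug", some ch))) := by
  induction cs generalizing acc with
  | nil => simp
  | cons c rest ih =>
    simp only [List.foldl_cons, List.filterMap_cons]
    cases pvFindFirst ("CHAPTER " ++ pvDget c "num") 0 lines with
    | none => simp [ih]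
    | some b => simp [ih]

-- the keys of pvTargets are the 13 distinct headings
theorem pvTargets_nodup : (pvTargets.map (fun t => t.1)).Nodup := by decide

-- pvHits over the full target list, split into its three parts
theorem pvHits_targets (lines : List String) :
    pvHits pvTargets 0 lines
      = pvChapHits lines
        ++ (match pvFindFirst "APPENDIX" 0 lines with
            | some i => [((i : Int), ("appendix" : String),
                (none : Option (List (String × String))))] | none => [])
        ++ (match pvFindFirst "A PARODY" 0 lines with
            | some i => [((i : Int), ("parody" : String),
                (none : Option (List (String × String))))] | none => []) := by
  simp only [pvHits, pvTargets, pvChapHits, List.filterMap_append, List.filterMap_map,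
    List.filterMap_cons, List.filterMap_nil, List.append_assoc]
  cases pvFindFirst "APPENDIX" 0 lines <;> cases pvFindFirst "A PARODY" 0 lines <;>
    simp [Function.comp]

-- ===== VERDICT (by name: the statement is the Claim_ definition above) =====
theorem find_chapter_boundaries_spec : Claim_equal_find_chapter_boundaries := by
  intro text _
  unfold Spec_find_chapter_boundaries find_chapter_boundaries find_chapter_boundaries_alt
  simp only
  obtain ⟨hperm, hpw⟩ :=
    pvScan_perm_pairwise ((PySem.Str.split? text "\n").getD []) pvTargets 0 pvTargets_nodup
  rw [pvHits_targets] at hperm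
  rw [pvFoldl_chapters]
  have hfold : [] ++ CHAPTERS.filterMap (fun ch =>
      (pvFindFirst ("CHAPTER " ++ pvDget ch "num") 0 ((PySem.Str.split? text "\n").getD [])).map
        (fun i => (i, pvDget ch "slug", some ch)))
      = pvChapHits ((PySem.Str.split? text "\n").getD []) := by
    simp [pvChapHits]
  rw [hfold]
  congr 1
  rcases hA : pvFindFirst "APPENDIX" 0 ((PySem.Str.split? text "\n").getD []) with _ | i <;>
    rcases hP : pvFindFirst "A PARODY" 0 ((PySem.Str.split? text "\n").getD []) with _ | j <;>
    · simp only [hA, hP] at hperm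
      simp only [List.append_nil, List.append_assoc] at hperm ⊢
      exact PySem.List.sorted_eq_of_perm_of_pairwise_lt _ _ _ hperm hpw
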